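-- pv_equiv track=rewrite | github.com/Innovate-To-Grow/Innovate-To-Grow-Website | src/cms/models/content/cms/cms_page.py | normalize_cms_route
-- ===== SOURCE A (Python) =====
-- def normalize_cms_route(route):
--     """Normalize CMS route paths to a canonical leading-slash/no-trailing-slash form."""
--     route = (route or "").strip()
--     if not route:
--         return "/"
--
--     segments = [segment.strip() for segment in route.split("/") if segment.strip()]
--     if not segments:
--         return "/"
--
--     return "/" + "/".join(segments)
-- ===== SOURCE B (Python) =====
-- def normalize_cms_route(route):
--     """Normalize CMS route paths to a canonical leading-slash/no-trailing-slash form.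
--
--     Single left-to-right pass: a pending-whitespace buffer and a 'separator seen'
--     flag replace the split/strip/filter/join pipeline of the original.
--     """
--     s = (route or "").strip()
--     res = []          # output characters
--     ws = []           # whitespace seen inside the current segment, not yet committed
--     sep = True        # a separator (start of path or '/') is pending
--     for ch in s:
--         if ch == "/":
--             sep = True
--             ws = []
--         elif ch.isspace():
--             ws.append(ch)
--         else:
--             if sep:
--                 res.append("/")
--                 sep = False
--             else:
--                 res.extend(ws)
--             res.append(ch)
--             ws = []
--     return "".join(res) or "/"
-- ===== Notes on version B (the rewrite author's own statement) =====
-- stated objective: alternative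
-- what changed: Replaced the strip/split/per-segment-strip/filter/join pipeline over slash-separated segments with a single left-to-right character scan that maintains a pending-whitespace buffer and a pending-separator flag, emitting the canonical route directly in one pass.
import Mathlib
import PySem

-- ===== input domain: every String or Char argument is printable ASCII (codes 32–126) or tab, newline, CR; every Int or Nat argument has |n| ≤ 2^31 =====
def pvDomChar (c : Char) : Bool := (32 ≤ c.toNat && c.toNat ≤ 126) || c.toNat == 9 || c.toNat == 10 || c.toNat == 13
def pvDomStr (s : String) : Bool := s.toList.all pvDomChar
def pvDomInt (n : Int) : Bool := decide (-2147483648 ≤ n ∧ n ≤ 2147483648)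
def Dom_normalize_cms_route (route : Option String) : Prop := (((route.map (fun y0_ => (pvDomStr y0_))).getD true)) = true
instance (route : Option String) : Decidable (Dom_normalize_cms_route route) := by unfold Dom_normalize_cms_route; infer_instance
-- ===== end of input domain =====

-- B replaces A's strip/split/filter/join pipeline by a single character-level pass
-- with a pending-whitespace buffer (objective: alternative single-pass algorithm).


-- ===== PORT A =====
def normalize_cms_route (route : Option String) : String :=
  let r := PySem.Chars.strip (route.getD "").toList
  if r = [] then "/"
  else
    let segments := ((PySem.Chars.splitOn r ['/']).map PySem.Chars.strip).filter
      (fun seg => seg ≠ [])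
    if segments = [] then "/"
    else String.mk ('/' :: PySem.Chars.join ['/'] segments)

-- ===== PORT B =====
-- one loop step of Source B: state = (res, ws, sep)
def pvStep (st : List Char × List Char × Bool) (c : Char) : List Char × List Char × Bool :=
  if c = '/' then (st.1, [], true)
  else if PySem.Chars.isspace c then (st.1, st.2.1 ++ [c], st.2.2)
  else if st.2.2 then (st.1 ++ ['/', c], [], false)
  else (st.1 ++ st.2.1 ++ [c], [], false)

def normalize_cms_route_alt (route : Option String) : String :=
  let s := PySem.Chars.strip (route.getD "").toList
  let st := s.foldl pvStep ([], [], true)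
  if st.1 = [] then "/" else String.mk st.1

-- ===== PRECONDITION & SPEC =====
def Spec_normalize_cms_route (route : Option String) (out : String) : Prop := out = normalize_cms_route_alt route
instance (route : Option String) (out : String) : Decidable (Spec_normalize_cms_route route out) := by unfold Spec_normalize_cms_route; infer_instance

-- ===== CLAIM (what is proved, stated in full; the proofs are below) =====
def Claim_equal_normalize_cms_route : Prop := ∀ (route : Option String), Dom_normalize_cms_route route → Spec_normalize_cms_route route (normalize_cms_route route)

-- ===== LEMMAS AND PROOFS =====

-- structural characterization of Python split("/") on char lists
def pvSegs : List Char → List (List Char)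
  | [] => [[]]
  | c :: t => if c = '/' then [] :: pvSegs t else (c :: (pvSegs t).headI) :: (pvSegs t).tail

-- structural characterization of B's fold (output component only)
def pvRun : Bool → List Char → List Char → List Char
  | _, _, [] => []
  | sep, ws, c :: t =>
    if c = '/' then pvRun true [] t
    else if PySem.Chars.isspace c then pvRun sep (ws ++ [c]) t
    else if sep then '/' :: c :: pvRun false [] t
    else ws ++ c :: pvRun false [] t

def pvFiltered (ss : List (List Char)) : List (List Char) :=
  (ss.map PySem.Chars.strip).filter (fun seg => seg ≠ [])

def pvOutS (ss : List (List Char)) : List Char :=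
  if pvFiltered ss = [] then [] else '/' :: PySem.Chars.join ['/'] (pvFiltered ss)

theorem pvSegs_ne_nil (l : List Char) : pvSegs l ≠ [] := by
  cases l with
  | nil => simp [pvSegs]
  | cons c t => simp only [pvSegs]; split <;> simp

theorem pvSegs_headI_tail (l : List Char) : (pvSegs l).headI :: (pvSegs l).tail = pvSegs l := by
  cases h : pvSegs l with
  | nil => exact absurd h (pvSegs_ne_nil l)
  | cons a b => simp

theorem pv_go_spec (fuel : Nat) (l cur : List Char) (acc : List (List Char)) (h : l.length ≤ fuel) :
    PySem.Chars.splitOn.go ['/'] fuel l cur acc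
      = acc.reverse ++ (cur.reverse ++ (pvSegs l).headI) :: (pvSegs l).tail := by
  induction fuel generalizing l cur acc with
  | zero =>
    have hl : l = [] := by cases l <;> simp_all
    subst hl
    simp [PySem.Chars.splitOn.go, pvSegs]
  | succ n ih =>
    cases l with
    | nil => simp [PySem.Chars.splitOn.go, pvSegs]
    | cons c rest =>
      by_cases hc : c = '/'
      · subst hc
        have hpre : List.isPrefixOf ['/'] ('/' :: rest) = true := by
          simp [List.isPrefixOf]
        simp only [PySem.Chars.splitOn.go, hpre, if_true, List.length_cons,
          List.length_nil, List.drop_succ_cons, Nat.zero_add, List.drop]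
        rw [ih rest [] (cur.reverse :: acc) (by simpa using Nat.le_of_succ_le_succ (by simpa using h))]
        simp [pvSegs, pvSegs_headI_tail]
      · have hpre : List.isPrefixOf ['/'] (c :: rest) = false := by
          simp [List.isPrefixOf]
          exact fun hh => hc hh.symm
        simp only [PySem.Chars.splitOn.go, hpre]
        rw [ih rest (c :: cur) acc (by simpa using Nat.le_of_succ_le_succ (by simpa using h))]
        simp [pvSegs, hc]

theorem pv_splitOn_eq_segs (l : List Char) : PySem.Chars.splitOn l ['/'] = pvSegs l := by
  unfold PySem.Chars.splitOn
  rw [pv_go_spec (l.length + 1) l [] [] (Nat.le_succ _)]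
  cases h : pvSegs l with
  | nil => exact absurd h (pvSegs_ne_nil l)
  | cons a b => simp

theorem pv_foldl_run (l : List Char) : ∀ (res ws : List Char) (sep : Bool),
    (l.foldl pvStep (res, ws, sep)).1 = res ++ pvRun sep ws l := by
  induction l with
  | nil => intro res ws sep; simp [pvRun]
  | cons c t ih =>
    intro res ws sep
    simp only [List.foldl_cons]
    by_cases hc : c = '/'
    · subst hc
      rw [show pvStep (res, ws, sep) '/' = (res, [], true) from by simp [pvStep]]
      rw [ih]; simp [pvRun]
    · by_cases hs : PySem.Chars.isspace c = true
      · rw [show pvStep (res, ws, sep) c = (res, ws ++ [c], sep) from by simp [pvStep, hc, hs]]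
        rw [ih]; simp [pvRun, hc, hs]
      · cases sep with
        | false =>
          rw [show pvStep (res, ws, false) c = (res ++ ws ++ [c], [], false) from by
            simp [pvStep, hc, hs]]
          rw [ih]; simp [pvRun, hc, hs]
        | true =>
          rw [show pvStep (res, ws, true) c = (res ++ ['/', c], [], false) from by
            simp [pvStep, hc, hs]]
          rw [ih]; simp [pvRun, hc, hs]

theorem pv_rstrip_allspace (l : List Char) (h : l.all PySem.Chars.isspace = true) :
    PySem.Chars.rstrip l = [] := by
  unfold PySem.Chars.rstrip
  have hd : List.dropWhile PySem.Chars.isspace l.reverse = [] := by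
    rw [List.dropWhile_eq_nil_iff]
    intro x hx
    exact (List.all_eq_true.mp h) x (List.mem_reverse.mp hx)
  simp [hd]

theorem pv_rstrip_cons (c : Char) (l : List Char)
    (h : PySem.Chars.isspace c = false ∨ l.all PySem.Chars.isspace = false) :
    PySem.Chars.rstrip (c :: l) = c :: PySem.Chars.rstrip l := by
  unfold PySem.Chars.rstrip
  simp only [List.reverse_cons, List.dropWhile_append]
  by_cases ha : l.all PySem.Chars.isspace = true
  · have hc : PySem.Chars.isspace c = false := by
      rcases h with h | h
      · exact h
      · exact absurd ha (by simp [h])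
    have hd : List.dropWhile PySem.Chars.isspace l.reverse = [] := by
      rw [List.dropWhile_eq_nil_iff]
      intro x hx
      exact (List.all_eq_true.mp ha) x (List.mem_reverse.mp hx)
    simp [hd, List.dropWhile, hc]
  · have hne : List.dropWhile PySem.Chars.isspace l.reverse ≠ [] := by
      rw [Ne, List.dropWhile_eq_nil_iff]
      intro hall
      exact ha (List.all_eq_true.mpr fun x hx => hall x (List.mem_reverse.mpr hx))
    simp [List.isEmpty_iff, hne]

theorem pv_strip_cons_space (c : Char) (l : List Char) (h : PySem.Chars.isspace c = true) :
    PySem.Chars.strip (c :: l) = PySem.Chars.strip l := by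
  simp [PySem.Chars.strip, PySem.Chars.lstrip, h]

theorem pv_strip_cons_nonspace (c : Char) (l : List Char) (h : PySem.Chars.isspace c = false) :
    PySem.Chars.strip (c :: l) = c :: PySem.Chars.rstrip l := by
  rw [PySem.Chars.strip, PySem.Chars.lstrip, List.dropWhile_cons_of_neg (by simp [h])]
  exact pv_rstrip_cons c l (Or.inl h)

theorem pv_strip_eq_nil_iff (l : List Char) :
    PySem.Chars.strip l = [] ↔ l.all PySem.Chars.isspace = true := by
  induction l with
  | nil => simp [PySem.Chars.strip, PySem.Chars.lstrip, PySem.Chars.rstrip]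
  | cons c t ih =>
    by_cases hs : PySem.Chars.isspace c = true
    · rw [pv_strip_cons_space c t hs]
      simp [hs, ih]
    · rw [pv_strip_cons_nonspace c t (by simpa using hs)]
      simp [hs]

theorem pvFiltered_cons (h : List Char) (tl : List (List Char)) :
    pvFiltered (h :: tl) =
      if h.all PySem.Chars.isspace = true then pvFiltered tl
      else PySem.Chars.strip h :: pvFiltered tl := by
  simp only [pvFiltered, List.map_cons, List.filter_cons]
  by_cases hh : h.all PySem.Chars.isspace = true
  · have hnil : PySem.Chars.strip h = [] := (pv_strip_eq_nil_iff h).mpr hh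
    simp [hh, hnil]
  · have hne : PySem.Chars.strip h ≠ [] := fun e => hh ((pv_strip_eq_nil_iff h).mp e)
    simp [hh, hne]

theorem pvFiltered_cons_space (c : Char) (hd : List Char) (tl : List (List Char))
    (hs : PySem.Chars.isspace c = true) :
    pvFiltered ((c :: hd) :: tl) = pvFiltered (hd :: tl) := by
  rw [pvFiltered_cons, pvFiltered_cons]
  have hall : (c :: hd).all PySem.Chars.isspace = hd.all PySem.Chars.isspace := by
    simp [hs]
  rw [hall, pv_strip_cons_space c hd hs]

theorem pvOutS_nil_cons (tl : List (List Char)) : pvOutS ([] :: tl) = pvOutS tl := by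
  unfold pvOutS
  rw [pvFiltered_cons]
  simp

theorem pv_run_spec (l : List Char) : ∀ ws : List Char,
    (pvRun true ws l = pvOutS (pvSegs l)) ∧
    (pvRun false ws l =
      (if (pvSegs l).headI.all PySem.Chars.isspace then []
       else ws ++ PySem.Chars.rstrip (pvSegs l).headI) ++ pvOutS (pvSegs l).tail) := by
  induction l with
  | nil =>
    intro ws
    constructor
    · simp [pvRun, pvSegs, pvOutS, pvFiltered, PySem.Chars.strip, PySem.Chars.lstrip,
        PySem.Chars.rstrip]
    · simp [pvRun, pvSegs, pvOutS, pvFiltered]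
  | cons c t ih =>
    intro ws
    by_cases hc : c = '/'
    · subst hc
      have h1 : pvRun true ws ('/' :: t) = pvOutS (pvSegs t) := by
        rw [pvRun]; simp [(ih []).1]
      refine ⟨?_, ?_⟩
      · rw [h1, show pvSegs ('/' :: t) = [] :: pvSegs t from by simp [pvSegs],
          pvOutS_nil_cons]
      · rw [show pvRun false ws ('/' :: t) = pvRun true [] t from by rw [pvRun]; simp]
        rw [(ih []).1]
        simp [pvSegs]
    · by_cases hs : PySem.Chars.isspace c = true
      · have hseg : pvSegs (c :: t) = (c :: (pvSegs t).headI) :: (pvSegs t).tail := by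
          simp [pvSegs, hc]
        refine ⟨?_, ?_⟩
        · rw [show pvRun true ws (c :: t) = pvRun true (ws ++ [c]) t from by
            rw [pvRun]; simp [hc, hs]]
          rw [(ih (ws ++ [c])).1, hseg]
          unfold pvOutS
          rw [pvFiltered_cons_space c _ _ hs]
          have : pvFiltered ((pvSegs t).headI :: (pvSegs t).tail) = pvFiltered (pvSegs t) := by
            rw [pvSegs_headI_tail]
          simp [this]
        · rw [show pvRun false ws (c :: t) = pvRun false (ws ++ [c]) t from by
            rw [pvRun]; simp [hc, hs]]
          rw [(ih (ws ++ [c])).2, hseg]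
          simp only [List.headI_cons, List.tail_cons, List.all_cons, hs, Bool.true_and]
          by_cases ha : (pvSegs t).headI.all PySem.Chars.isspace = true
          · simp [ha]
          · simp only [ha, if_false, Bool.false_eq_true]
            rw [pv_rstrip_cons c _ (Or.inr (by simpa using ha))]
            simp
      · have hsF : PySem.Chars.isspace c = false := by simpa using hs
        have hseg : pvSegs (c :: t) = (c :: (pvSegs t).headI) :: (pvSegs t).tail := by
          simp [pvSegs, hc]
        have hr : (if (pvSegs t).headI.all PySem.Chars.isspace = true then ([] : List Char)
            else PySem.Chars.rstrip (pvSegs t).headI) = PySem.Chars.rstrip (pvSegs t).headI := by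
          split
          · rename_i hh; rw [pv_rstrip_allspace _ hh]
          · rfl
        have hallF : (c :: (pvSegs t).headI).all PySem.Chars.isspace = false := by
          simp [hsF]
        have hstrip : PySem.Chars.strip (c :: (pvSegs t).headI)
            = c :: PySem.Chars.rstrip (pvSegs t).headI := pv_strip_cons_nonspace c _ hsF
        have hF : pvFiltered (pvSegs (c :: t))
            = (c :: PySem.Chars.rstrip (pvSegs t).headI) :: pvFiltered (pvSegs t).tail := by
          rw [hseg, pvFiltered_cons, hallF, hstrip]
          simp
        refine ⟨?_, ?_⟩
        · rw [show pvRun true ws (c :: t) = '/' :: c :: pvRun false [] t from by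
            rw [pvRun]; simp [hc, hs]]
          rw [(ih []).2]; simp only [List.nil_append]; rw [hr]
          unfold pvOutS
          rw [hF]
          cases hcase : pvFiltered (pvSegs t).tail with
          | nil =>
            simp [PySem.Chars.join, List.intercalate]
          | cons y r =>
            rw [show PySem.Chars.join ['/'] ((c :: PySem.Chars.rstrip (pvSegs t).headI) :: y :: r)
                = (c :: PySem.Chars.rstrip (pvSegs t).headI) ++ '/' :: PySem.Chars.join ['/'] (y :: r) from by
              simp [PySem.Chars.join, List.intercalate, List.intersperse]]
            simp
        · rw [show pvRun false ws (c :: t) = ws ++ c :: pvRun false [] t from by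
            rw [pvRun]; simp [hc, hs]]
          rw [(ih []).2]; simp only [List.nil_append]; rw [hr, hseg]
          simp only [List.headI_cons, List.tail_cons, hallF, Bool.false_eq_true, if_false]
          rw [pv_rstrip_cons c _ (Or.inl hsF)]
          simp

-- ===== VERDICT (by name: the statement is the Claim_ definition above) =====
theorem pv_alt_eq (route : Option String) :
    normalize_cms_route_alt route =
      (if pvOutS (pvSegs (PySem.Chars.strip (route.getD "").toList)) = [] then "/"
       else String.mk (pvOutS (pvSegs (PySem.Chars.strip (route.getD "").toList)))) := by
  unfold normalize_cms_route_alt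
  show (if ((PySem.Chars.strip (route.getD "").toList).foldl pvStep ([], [], true)).1 = [] then "/"
    else String.mk ((PySem.Chars.strip (route.getD "").toList).foldl pvStep ([], [], true)).1) = _
  rw [show ((PySem.Chars.strip (route.getD "").toList).foldl pvStep ([], [], true)).1
      = [] ++ pvRun true [] (PySem.Chars.strip (route.getD "").toList) from
    pv_foldl_run _ [] [] true]
  rw [List.nil_append, (pv_run_spec _ []).1]

theorem normalize_cms_route_spec : Claim_equal_normalize_cms_route := by
  intro route _
  unfold Spec_normalize_cms_route
  rw [pv_alt_eq]
  unfold normalize_cms_route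
  show (if PySem.Chars.strip (route.getD "").toList = [] then "/"
    else
      if ((PySem.Chars.splitOn (PySem.Chars.strip (route.getD "").toList) ['/']).map
            PySem.Chars.strip).filter (fun seg => seg ≠ []) = [] then "/"
      else String.mk ('/' :: PySem.Chars.join ['/']
        (((PySem.Chars.splitOn (PySem.Chars.strip (route.getD "").toList) ['/']).map
            PySem.Chars.strip).filter (fun seg => seg ≠ [])))) = _
  rw [pv_splitOn_eq_segs]
  set r := PySem.Chars.strip (route.getD "").toList with hrdef
  by_cases hr : r = []
  · rw [if_pos hr, hr]
    simp [pvOutS, pvFiltered, pvSegs, PySem.Chars.strip, PySem.Chars.lstrip, PySem.Chars.rstrip]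
  · rw [if_neg hr]
    rw [show ((pvSegs r).map PySem.Chars.strip).filter (fun seg => seg ≠ []) = pvFiltered (pvSegs r)
      from rfl]
    by_cases hf : pvFiltered (pvSegs r) = []
    · have h0 : pvOutS (pvSegs r) = [] := by simp [pvOutS, hf]
      simp [hf, h0]
    · have hout : pvOutS (pvSegs r) = '/' :: PySem.Chars.join ['/'] (pvFiltered (pvSegs r)) := by
        simp [pvOutS, hf]
      rw [hout, if_neg hf]
      simp
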